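-- pv_equiv track=rewrite | github.com/leejingooo/client-simulation | pages/15_Figure_Generator.py | load_psyche_scores
-- ===== SOURCE A (Python) =====
-- EXPERIMENT_NUMBERS = [
--     # 6201 MDD
--     (6201, 3111), (6201, 3117),  # gptsmaller
--     (6201, 1121), (6201, 1123),  # gptlarge
--     (6201, 3134), (6201, 3138),  # claudesmaller
--     (6201, 1143), (6201, 1145),  # claudelarge
--     # 6202 BD
--     (6202, 3211), (6202, 3212),  # gptsmaller
--     (6202, 1221), (6202, 1222),  # gptlarge
--     (6202, 3231), (6202, 3234),  # claudesmaller
--     (6202, 1241), (6202, 1242),  # claudelarge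
--     # 6206 OCD
--     (6206, 3611), (6206, 3612),  # gptsmaller
--     (6206, 1621), (6206, 1622),  # gptlarge
--     (6206, 3631), (6206, 3632),  # claudesmaller
--     (6206, 1641), (6206, 1642),  # claudelarge
-- ]
--
-- def load_psyche_scores(root_data):
--     """Load automated PSYCHE scores."""
--     psyche_data = {}
--     for client_num, exp_num in EXPERIMENT_NUMBERS:
--         value = None
--         target_prefix = f"clients_{client_num}_psyche_"
--         target_suffix = f"_{exp_num}"
--         for key, data in (root_data or {}).items():
--             if not key.startswith(target_prefix):
--                 continue
--             if not key.endswith(target_suffix):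
--                 continue
--             record = data or {}
--             if 'psyche_score' in record:
--                 value = record['psyche_score']
--                 break
--         psyche_data[(client_num, exp_num)] = value
--     return psyche_data
-- ===== SOURCE B (Python) =====
-- # Single pass over root_data: parse each key positionally (fixed-width layout
-- # "clients_CCCC_psyche_..._EEEE") and index the first score per target pair,
-- # instead of 24 repeated scans of the whole dict.
--
-- EXPERIMENT_NUMBERS = [
--     # 6201 MDD
--     (6201, 3111), (6201, 3117),  # gptsmaller
--     (6201, 1121), (6201, 1123),  # gptlarge
--     (6201, 3134), (6201, 3138),  # claudesmaller
--     (6201, 1143), (6201, 1145),  # claudelarge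
--     # 6202 BD
--     (6202, 3211), (6202, 3212),  # gptsmaller
--     (6202, 1221), (6202, 1222),  # gptlarge
--     (6202, 3231), (6202, 3234),  # claudesmaller
--     (6202, 1241), (6202, 1242),  # claudelarge
--     # 6206 OCD
--     (6206, 3611), (6206, 3612),  # gptsmaller
--     (6206, 1621), (6206, 1622),  # gptlarge
--     (6206, 3631), (6206, 3632),  # claudesmaller
--     (6206, 1641), (6206, 1642),  # claudelarge
-- ]
--
-- TARGET_KEYS = {(str(c), str(e)) for c, e in EXPERIMENT_NUMBERS}
--
--
-- def _parse_key(key):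
--     """Positional parse of 'clients_CCCC_psyche_..._EEEE' (all targets are 4 digits)."""
--     if not key.startswith("clients_"):
--         return None
--     if key[12:20] != "_psyche_":
--         return None
--     if key[-5] != "_":           # safe: previous check forces len(key) >= 20
--         return None
--     return key[8:12], key[-4:]
--
--
-- def load_psyche_scores(root_data):
--     """Load automated PSYCHE scores."""
--     found = {}
--     for key, data in (root_data or {}).items():
--         record = data or {}
--         if 'psyche_score' not in record:
--             continue
--         pair = _parse_key(key)
--         if pair is not None and pair in TARGET_KEYS and pair not in found:
--             found[pair] = record['psyche_score']
--     return {(c, e): found.get((str(c), str(e))) for c, e in EXPERIMENT_NUMBERS}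
-- ===== Notes on version B (the rewrite author's own statement) =====
-- stated objective: faster
-- what changed: A scans the whole root_data dict once per each of the 24 target (client, exp) pairs; B makes a single pass over root_data, parsing each key positionally into a (client, exp) string pair and recording the first score per target pair in a dict, then reads the 24 answers off that index.
import Mathlib
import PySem

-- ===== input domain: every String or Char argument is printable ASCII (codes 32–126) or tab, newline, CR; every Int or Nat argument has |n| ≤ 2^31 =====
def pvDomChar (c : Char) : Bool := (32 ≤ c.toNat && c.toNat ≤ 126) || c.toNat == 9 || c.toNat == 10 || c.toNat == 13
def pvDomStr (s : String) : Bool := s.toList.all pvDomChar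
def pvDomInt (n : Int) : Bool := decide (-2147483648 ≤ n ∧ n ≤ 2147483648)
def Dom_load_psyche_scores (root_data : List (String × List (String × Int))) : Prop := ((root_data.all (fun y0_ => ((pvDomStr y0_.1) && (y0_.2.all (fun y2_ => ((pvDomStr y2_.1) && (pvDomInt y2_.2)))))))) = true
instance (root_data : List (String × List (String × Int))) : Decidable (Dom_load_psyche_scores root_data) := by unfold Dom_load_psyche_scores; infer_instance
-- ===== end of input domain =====

-- B replaces A's 24 repeated scans of root_data by one pass that parses each key
-- positionally and indexes the first score per target pair (faster by a constant factor).


-- ===== PORT A =====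
-- module constant EXPERIMENT_NUMBERS (shared by both ports, as in the Python module)
def pvExpNums : List (Int × Int) :=
  [(6201, 3111), (6201, 3117), (6201, 1121), (6201, 1123),
   (6201, 3134), (6201, 3138), (6201, 1143), (6201, 1145),
   (6202, 3211), (6202, 3212), (6202, 1221), (6202, 1222),
   (6202, 3231), (6202, 3234), (6202, 1241), (6202, 1242),
   (6206, 3611), (6206, 3612), (6206, 1621), (6206, 1622),
   (6206, 3631), (6206, 3632), (6206, 1641), (6206, 1642)]

-- A's inner 'for key, data in (root_data or {}).items(): … break' loop for one (prefix, suffix)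
def pvFindA (items : List (String × List (String × Int))) (pre suf : String) : Option Int :=
  match items with
  | [] => none
  | (key, data) :: rest =>
    if PySem.Str.startswith key pre then
      if PySem.Str.endswith key suf then
        match PySem.Dict.get? (PySem.Dict.mk data) "psyche_score" with
        | some v => some v
        | none => pvFindA rest pre suf
      else pvFindA rest pre suf
    else pvFindA rest pre suf

def load_psyche_scores (root_data : List (String × List (String × Int))) : List (Int × Int × Option Int) :=
  ((pvExpNums.foldl
      (fun (psyche_data : PySem.Dict (Int × Int) (Option Int)) ce =>
        psyche_data.insert ce
          (pvFindA root_data ("clients_" ++ PySem.Int.toStr ce.1 ++ "_psyche_")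
                             ("_" ++ PySem.Int.toStr ce.2)))
      PySem.Dict.empty).items).map (fun p => (p.1.1, p.1.2, p.2))

-- ===== PORT B =====
-- module constant TARGET_KEYS (set comprehension over EXPERIMENT_NUMBERS)
def pvTargetKeys : List (String × String) :=
  PySem.Set.ofList (pvExpNums.map (fun ce => (PySem.Int.toStr ce.1, PySem.Int.toStr ce.2)))

-- helper _parse_key of Source B (positional parse of 'clients_CCCC_psyche_..._EEEE')
def pvParseKey (key : String) : Option (String × String) :=
  if PySem.Str.startswith key "clients_" then
    if PySem.Str.slice key (some 12) (some 20) = "_psyche_" then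
      if PySem.Str.pyGet? key (-5) = some '_' then
        some (PySem.Str.slice key (some 8) (some 12), PySem.Str.slice key (some (-4)) none)
      else none
    else none
  else none

-- body of Source B's single 'for key, data in (root_data or {}).items()' loop
def pvStepB (found : PySem.Dict (String × String) Int) (kv : String × List (String × Int)) :
    PySem.Dict (String × String) Int :=
  match PySem.Dict.get? (PySem.Dict.mk kv.2) "psyche_score" with
  | none => found
  | some v =>
    match pvParseKey kv.1 with
    | none => found
    | some pair =>
      if pair ∈ pvTargetKeys ∧ found.contains pair = false then found.insert pair v else found

def load_psyche_scores_alt (root_data : List (String × List (String × Int))) : List (Int × Int × Option Int) :=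
  let found := root_data.foldl pvStepB PySem.Dict.empty
  pvExpNums.map (fun ce => (ce.1, ce.2, found.get? (PySem.Int.toStr ce.1, PySem.Int.toStr ce.2)))

-- ===== PRECONDITION & SPEC =====
def Spec_load_psyche_scores (root_data : List (String × List (String × Int))) (out : List (Int × Int × Option Int)) : Prop := out = load_psyche_scores_alt root_data
instance (root_data : List (String × List (String × Int))) (out : List (Int × Int × Option Int)) : Decidable (Spec_load_psyche_scores root_data out) := by unfold Spec_load_psyche_scores; infer_instance

-- ===== CLAIM (what is proved, stated in full; the proofs are below) =====
def Claim_equal_load_psyche_scores : Prop := ∀ (root_data : List (String × List (String × Int))), Dom_load_psyche_scores root_data → Spec_load_psyche_scores root_data (load_psyche_scores root_data)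

-- ===== LEMMAS AND PROOFS =====

-- two generic helpers
lemma pvStrExt (s t : String) (h : s.toList = t.toList) : s = t := by
  have h2 := congrArg String.ofList h
  rwa [String.ofList_toList, String.ofList_toList] at h2

lemma pvLen4 {α : Type} (l : List α) (h : l.length = 4) : ∃ a b c d, l = [a, b, c, d] := by
  rcases l with _ | ⟨a, _ | ⟨b, _ | ⟨c, _ | ⟨d, _ | ⟨x, t⟩⟩⟩⟩⟩
  · simp at h
  · simp at h
  · simp at h
  · simp at h
  · exact ⟨a, b, c, d, rfl⟩
  · simp at h

-- reference: first score in the list whose key parses to exactly the pair p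
def pvFirst (p : String × String) : List (String × List (String × Int)) → Option Int
  | [] => none
  | (key, data) :: rest =>
    match PySem.Dict.get? (PySem.Dict.mk data) "psyche_score" with
    | some v => if pvParseKey key = some p then some v else pvFirst p rest
    | none => pvFirst p rest

-- A key passes A's startswith/endswith test for a 4-char client and 4-char exp
-- iff B's positional parse returns exactly that pair.
lemma pvMatch_iff (a b c d e f g h : Char) (key : String) :
    (PySem.Str.startswith key (String.ofList ("clients_".toList ++ [a, b, c, d] ++ "_psyche_".toList)) = true ∧
     PySem.Str.endswith key (String.ofList ['_', e, f, g, h]) = true) ↔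
    pvParseKey key = some (String.ofList [a, b, c, d], String.ofList [e, f, g, h]) := by
  constructor
  · rintro ⟨h1, h2⟩
    rw [PySem.Str.startswith_eq, PySem.Chars.startswith_iff, String.toList_ofList] at h1
    rw [PySem.Str.endswith_eq, PySem.Chars.endswith_iff, String.toList_ofList] at h2
    obtain ⟨t, ht⟩ := h1
    obtain ⟨u, hu⟩ := h2
    have hC1 : PySem.Str.startswith key "clients_" = true := by
      rw [PySem.Str.startswith_eq, PySem.Chars.startswith_iff]
      refine ⟨[a, b, c, d] ++ "_psyche_".toList ++ t, ?_⟩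
      rw [← ht]; simp
    have hC2 : PySem.Str.slice key (some 12) (some 20) = "_psyche_" := by
      apply pvStrExt
      rw [PySem.Str.toList_slice, PySem.Chars.slice_eq_listSlice,
          PySem.List.slice_toNat _ (by norm_num) (by norm_num), ← ht]
      simp
    have hC3 : PySem.Str.pyGet? key (-5) = some '_' := by
      rw [PySem.Str.pyGet?_eq, PySem.Chars.pyGet?_eq_listPyGet?, ← hu]
      rw [PySem.List.pyGet?_neg_ofNat _ 5 (by norm_num)
            (by simp only [List.length_append, List.length_cons, List.length_nil]; omega)]
      have hl : (u ++ ['_', e, f, g, h] : List Char).length - 5 = u.length := by simp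
      rw [hl, List.getElem?_append_right (Nat.le_refl _)]
      simp
    have hC4 : PySem.Str.slice key (some 8) (some 12) = String.ofList [a, b, c, d] := by
      apply pvStrExt
      rw [PySem.Str.toList_slice, PySem.Chars.slice_eq_listSlice,
          PySem.List.slice_toNat _ (by norm_num) (by norm_num), String.toList_ofList, ← ht]
      simp
    have hC5 : PySem.Str.slice key (some (-4)) none = String.ofList [e, f, g, h] := by
      apply pvStrExt
      rw [PySem.Str.toList_slice, PySem.Chars.slice_eq_listSlice,
          PySem.List.slice_from_neg_ofNat _ 4 (by norm_num), String.toList_ofList, ← hu]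
      have hl : (u ++ ['_', e, f, g, h] : List Char).length - 4 = u.length + 1 := by simp
      rw [hl, List.drop_append]
      simp
    unfold pvParseKey
    rw [if_pos hC1, if_pos hC2, if_pos hC3, hC4, hC5]
  · intro hp
    unfold pvParseKey at hp
    split_ifs at hp with hC1 hC2 hC3
    · simp only [Option.some.injEq, Prod.mk.injEq] at hp
      obtain ⟨hp4, hp5⟩ := hp
      -- move everything to the List Char level
      rw [PySem.Str.startswith_eq, PySem.Chars.startswith_iff] at hC1
      have h2' : List.take 8 (List.drop 12 key.toList) = "_psyche_".toList := by
        have h2t := congrArg String.toList hC2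
        rw [PySem.Str.toList_slice, PySem.Chars.slice_eq_listSlice,
            PySem.List.slice_toNat _ (by norm_num) (by norm_num)] at h2t
        exact h2t
      have hlen : 20 ≤ key.toList.length := by
        have hl := congrArg List.length h2'
        simp only [List.length_take, List.length_drop] at hl
        have hl8 : ("_psyche_".toList).length = 8 := rfl
        rw [hl8] at hl
        omega
      have h4' : List.take 4 (List.drop 8 key.toList) = [a, b, c, d] := by
        have h4t := congrArg String.toList hp4
        rw [PySem.Str.toList_slice, PySem.Chars.slice_eq_listSlice,
            PySem.List.slice_toNat _ (by norm_num) (by norm_num), String.toList_ofList] at h4t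
        exact h4t
      have h5' : List.drop (key.toList.length - 4) key.toList = [e, f, g, h] := by
        have h5t := congrArg String.toList hp5
        rwa [PySem.Str.toList_slice, PySem.Chars.slice_eq_listSlice,
            PySem.List.slice_from_neg_ofNat _ 4 (by norm_num), String.toList_ofList] at h5t
      have h3' : key.toList[key.toList.length - 5]? = some '_' := by
        rw [PySem.Str.pyGet?_eq, PySem.Chars.pyGet?_eq_listPyGet?] at hC3
        rwa [PySem.List.pyGet?_neg_ofNat _ 5 (by norm_num) (by omega)] at hC3
      constructor
      · -- startswith
        rw [PySem.Str.startswith_eq, PySem.Chars.startswith_iff, String.toList_ofList]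
        have htake8 : List.take 8 key.toList = "clients_".toList := by
          have hpt := List.prefix_iff_eq_take.mp hC1
          have hl8 : ("clients_".toList).length = 8 := rfl
          rw [hl8] at hpt
          exact hpt.symm
        rw [List.prefix_iff_eq_take]
        have hPlen : (("clients_".toList ++ [a, b, c, d] ++ "_psyche_".toList) : List Char).length = 20 := by
          have hl1 : ("clients_".toList).length = 8 := rfl
          have hl2 : ("_psyche_".toList).length = 8 := rfl
          simp only [List.length_append, List.length_cons, List.length_nil, hl1, hl2]
        rw [hPlen, show (20 : ℕ) = 8 + 12 from rfl, List.take_add,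
            show (12 : ℕ) = 4 + 8 from rfl, List.take_add, List.drop_drop,
            show (8 + 4 : ℕ) = 12 from rfl, htake8, h4', h2']
        simp
      · -- endswith
        rw [PySem.Str.endswith_eq, PySem.Chars.endswith_iff, String.toList_ofList]
        obtain ⟨hlt, hEq⟩ := List.getElem?_eq_some_iff.mp h3'
        have hdrop : List.drop (key.toList.length - 5) key.toList = '_' :: [e, f, g, h] := by
          rw [List.drop_eq_getElem_cons hlt, hEq,
              show key.toList.length - 5 + 1 = key.toList.length - 4 from by omega, h5']
        rw [← hdrop]
        exact List.drop_suffix _ _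

-- A's scan for a (prefix, suffix) pair equals the reference first-match value,
-- given that the prefix/suffix test is equivalent to B's parse hitting p.
lemma pvFindA_eq_pvFirst (pre suf : String) (p : String × String)
    (hiff : ∀ key : String,
      (PySem.Str.startswith key pre = true ∧ PySem.Str.endswith key suf = true) ↔
      pvParseKey key = some p) :
    ∀ l : List (String × List (String × Int)), pvFindA l pre suf = pvFirst p l := by
  intro l
  induction l with
  | nil => rfl
  | cons kv rest ih =>
    obtain ⟨key, data⟩ := kv
    by_cases h1 : PySem.Str.startswith key pre = true
    · by_cases h2 : PySem.Str.endswith key suf = true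
      · have hp : pvParseKey key = some p := (hiff key).mp ⟨h1, h2⟩
        cases hS : PySem.Dict.get? (PySem.Dict.mk data) "psyche_score" <;>
          simp [pvFindA, pvFirst, h1, h2, hp, hS, ih,
                -PySem.Str.startswith_eq, -PySem.Str.endswith_eq]
      · have hp : pvParseKey key ≠ some p := fun hc => h2 ((hiff key).mpr hc).2
        cases hS : PySem.Dict.get? (PySem.Dict.mk data) "psyche_score" <;>
          simp [pvFindA, pvFirst, h1, h2, hp, hS, ih,
                -PySem.Str.startswith_eq, -PySem.Str.endswith_eq]
    · have hp : pvParseKey key ≠ some p := fun hc => h1 ((hiff key).mpr hc).1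
      cases hS : PySem.Dict.get? (PySem.Dict.mk data) "psyche_score" <;>
        simp [pvFindA, pvFirst, h1, hp, hS, ih,
              -PySem.Str.startswith_eq, -PySem.Str.endswith_eq]

-- invariant of B's single pass
lemma pvFoldB_get? (l : List (String × List (String × Int)))
    (acc : PySem.Dict (String × String) Int) (p : String × String) (hp : p ∈ pvTargetKeys) :
    (l.foldl pvStepB acc).get? p = (acc.get? p).or (pvFirst p l) := by
  induction l generalizing acc with
  | nil => simp [pvFirst]
  | cons kv rest ih =>
    obtain ⟨key, data⟩ := kv
    simp only [List.foldl_cons]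
    cases hscore : PySem.Dict.get? (PySem.Dict.mk data) "psyche_score" with
    | none =>
      simp only [pvStepB, hscore]
      rw [ih]
      simp [pvFirst, hscore]
    | some v =>
      cases hparse : pvParseKey key with
      | none =>
        simp only [pvStepB, hscore, hparse]
        rw [ih]
        simp [pvFirst, hscore, hparse]
      | some q =>
        by_cases hqp : q = p
        · subst hqp
          by_cases hcont : acc.contains q = false
          · have hget : acc.get? q = none := (PySem.Dict.get?_eq_none_iff_contains acc q).mpr hcont
            simp only [pvStepB, hscore, hparse]
            rw [if_pos ⟨hp, hcont⟩, ih]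
            simp [pvFirst, hscore, hparse, hget, PySem.Dict.get?_insert_self]
          · have hb : acc.contains q = true := by revert hcont; cases acc.contains q <;> simp
            have hsome : (acc.get? q).isSome := by
              rw [← PySem.Dict.contains_eq_isSome_get?]; exact hb
            obtain ⟨w, hw⟩ := Option.isSome_iff_exists.mp hsome
            simp only [pvStepB, hscore, hparse]
            rw [if_neg (fun hcond => hcont hcond.2), ih]
            simp [pvFirst, hscore, hparse, hw]
        · have hins : ∀ v' : Int, (acc.insert q v').get? p = acc.get? p :=
            fun v' => PySem.Dict.get?_insert_of_ne acc v' (fun hc => hqp hc.symm)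
          have hstep : (pvStepB acc (key, data)).get? p = acc.get? p := by
            simp only [pvStepB, hscore, hparse]
            split
            · exact hins v
            · rfl
          rw [ih, hstep]
          simp [pvFirst, hscore, hparse, hqp]

-- shape of A's output
lemma pvA_shape (rd : List (String × List (String × Int))) :
    load_psyche_scores rd =
      pvExpNums.map (fun ce => (ce.1, ce.2,
        pvFindA rd ("clients_" ++ PySem.Int.toStr ce.1 ++ "_psyche_") ("_" ++ PySem.Int.toStr ce.2))) := by
  unfold load_psyche_scores
  rw [PySem.Dict.items_foldl_insert_fresh pvExpNums (fun ce => ce)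
        (fun ce => pvFindA rd ("clients_" ++ PySem.Int.toStr ce.1 ++ "_psyche_") ("_" ++ PySem.Int.toStr ce.2))
        PySem.Dict.empty (by intro a _; simp) (by decide)]
  rfl

-- shape of B's output
lemma pvB_shape (rd : List (String × List (String × Int))) :
    load_psyche_scores_alt rd =
      pvExpNums.map (fun ce => (ce.1, ce.2,
        pvFirst (PySem.Int.toStr ce.1, PySem.Int.toStr ce.2) rd)) := by
  unfold load_psyche_scores_alt
  apply List.map_congr_left
  intro ce hce
  have hp : (PySem.Int.toStr ce.1, PySem.Int.toStr ce.2) ∈ pvTargetKeys := by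
    unfold pvTargetKeys
    rw [PySem.Set.mem_ofList]
    exact List.mem_map.mpr ⟨ce, hce, rfl⟩
  rw [pvFoldB_get? rd PySem.Dict.empty _ hp]
  simp

-- one target pair (4-char client, 4-char exp): A's scan = the reference first-match
lemma pvPerPair (c e : Int) (cs es : List Char)
    (h1 : PySem.Int.toStr c = String.ofList cs) (h2 : PySem.Int.toStr e = String.ofList es)
    (hc : cs.length = 4) (he : es.length = 4)
    (rd : List (String × List (String × Int))) :
    pvFindA rd ("clients_" ++ PySem.Int.toStr c ++ "_psyche_") ("_" ++ PySem.Int.toStr e) =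
    pvFirst (PySem.Int.toStr c, PySem.Int.toStr e) rd := by
  obtain ⟨a, b, c', d, rfl⟩ := pvLen4 cs hc
  obtain ⟨e', f, g, h, rfl⟩ := pvLen4 es he
  rw [h1, h2]
  have hpre : ("clients_" ++ String.ofList [a, b, c', d] ++ "_psyche_") =
      String.ofList ("clients_".toList ++ [a, b, c', d] ++ "_psyche_".toList) :=
    pvStrExt _ _ (by simp [String.toList_append, String.toList_ofList])
  have hsuf : ("_" ++ String.ofList [e', f, g, h]) = String.ofList ['_', e', f, g, h] :=
    pvStrExt _ _ (by simp [String.toList_append, String.toList_ofList])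
  rw [hpre, hsuf]
  exact pvFindA_eq_pvFirst _ _ _ (fun key => pvMatch_iff a b c' d e' f g h key) rd

-- ===== VERDICT (by name: the statement is the Claim_ definition above) =====
theorem load_psyche_scores_spec : Claim_equal_load_psyche_scores := by
  intro rd _
  unfold Spec_load_psyche_scores
  rw [pvA_shape, pvB_shape]
  apply List.map_congr_left
  intro ce hce
  fin_cases hce <;>
    exact congrArg (Prod.mk _) (congrArg (Prod.mk _)
      (pvPerPair _ _ _ _ rfl rfl (by decide) (by decide) rd))
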